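-- pv_equiv track=rewrite | github.com/karimib/imp-uqfe-demo-charm | qfehelpers.py | matrix_vector_dot
-- ===== SOURCE A (Python) =====
-- def matrix_vector_dot(matrix, vector, p):
--     """
--     Computes the dot product of a matrix and a vector, reducing results modulo p.
--     """
--     if len(matrix[0]) != len(vector):
--         raise ValueError(
--             "Number of columns in the matrix must match the length of the vector"
--         )
--
--     # Compute the dot product row-wise, reducing modulo p
--     result = [
--         sum((row[i] * vector[i]) for i in range(len(vector))) % p for row in matrix
--     ]
--     return result
-- ===== SOURCE B (Python) =====
-- def matrix_vector_dot(matrix, vector, p):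
--     """
--     Computes the dot product of a matrix and a vector, reducing results modulo p.
--     Column-major accumulation: one running total per row, reduced mod p once at the end.
--     """
--     if len(matrix[0]) != len(vector):
--         raise ValueError(
--             "Number of columns in the matrix must match the length of the vector"
--         )
--     acc = [0] * len(matrix)
--     for i in range(len(vector)):
--         vi = vector[i]
--         acc = [a + vi * row[i] for a, row in zip(acc, matrix)]
--     return [a % p for a in acc]
-- ===== Notes on version B (the rewrite author's own statement) =====
-- stated objective: alternative
-- what changed: Row-wise independent dot products (sum per row) replaced by column-major accumulation: one running total per row updated across column indices, reduced mod p once at the end.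
import Mathlib
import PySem

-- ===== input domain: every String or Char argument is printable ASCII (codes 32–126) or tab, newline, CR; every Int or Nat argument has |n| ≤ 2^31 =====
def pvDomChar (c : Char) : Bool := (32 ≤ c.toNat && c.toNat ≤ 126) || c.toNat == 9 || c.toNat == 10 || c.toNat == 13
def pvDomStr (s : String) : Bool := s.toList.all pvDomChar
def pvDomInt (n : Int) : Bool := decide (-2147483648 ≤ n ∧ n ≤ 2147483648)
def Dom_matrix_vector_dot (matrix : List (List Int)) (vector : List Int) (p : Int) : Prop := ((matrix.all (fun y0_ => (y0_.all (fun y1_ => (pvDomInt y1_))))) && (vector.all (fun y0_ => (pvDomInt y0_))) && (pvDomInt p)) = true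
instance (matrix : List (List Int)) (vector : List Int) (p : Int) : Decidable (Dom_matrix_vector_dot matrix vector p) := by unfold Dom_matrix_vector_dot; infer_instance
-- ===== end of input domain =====

-- B replaces row-wise dot products by column-major accumulation (running totals per row, one final mod); alternative decomposition, same cost.


-- ===== PORT A =====
-- row-wise: for each row, sum row[i]*vector[i] over i in range(len(vector)), then % p
def matrix_vector_dot (matrix : List (List Int)) (vector : List Int) (p : Int) : List Int :=
  matrix.map (fun row =>
    PySem.Int.mod ((List.range vector.length).foldl
      (fun s i => s + (row.getD i 0) * (vector.getD i 0)) 0) p)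

-- ===== PORT B =====
-- column-major: running totals per row, updated column by column; mod p once at the end
def matrix_vector_dot_alt (matrix : List (List Int)) (vector : List Int) (p : Int) : List Int :=
  let acc := (List.range vector.length).foldl
    (fun acc i => List.zipWith (fun a row => a + (vector.getD i 0) * (row.getD i 0)) acc matrix)
    (matrix.map (fun _ => (0 : Int)))
  acc.map (fun a => PySem.Int.mod a p)

-- ===== PRECONDITION & SPEC =====
-- Pre_ excludes exactly the inputs on which the Python A raises: empty matrix (IndexError on matrix[0]),
-- column-count mismatch (ValueError), a row shorter than the vector (IndexError), or p = 0 (ZeroDivisionError).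
def Pre_matrix_vector_dot (matrix : List (List Int)) (vector : List Int) (p : Int) : Prop :=
  matrix ≠ [] ∧ matrix.headI.length = vector.length ∧
  (∀ row ∈ matrix, vector.length ≤ row.length) ∧ p ≠ 0
instance (matrix : List (List Int)) (vector : List Int) (p : Int) : Decidable (Pre_matrix_vector_dot matrix vector p) := by unfold Pre_matrix_vector_dot; infer_instance
def pvWitness_matrix_vector_dot : List (List Int) × List Int × Int := ([[1, 2], [3, 4]], [5, 6], 7)

def Spec_matrix_vector_dot (matrix : List (List Int)) (vector : List Int) (p : Int) (out : List Int) : Prop := out = matrix_vector_dot_alt matrix vector p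
instance (matrix : List (List Int)) (vector : List Int) (p : Int) (out : List Int) : Decidable (Spec_matrix_vector_dot matrix vector p out) := by unfold Spec_matrix_vector_dot; infer_instance

-- ===== CLAIM (what is proved, stated in full; the proofs are below) =====
def Claim_equal_matrix_vector_dot : Prop := ∀ (matrix : List (List Int)) (vector : List Int) (p : Int), Dom_matrix_vector_dot matrix vector p → Pre_matrix_vector_dot matrix vector p → Spec_matrix_vector_dot matrix vector p (matrix_vector_dot matrix vector p)

-- ===== LEMMAS AND PROOFS =====

-- fusing two zipWiths against the same right list
theorem zipWith_zipWith_same {α β γ δ : Type} (f : γ → β → δ) (g : α → β → γ)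
    (init : List α) (m : List β) :
    List.zipWith f (List.zipWith g init m) m
      = List.zipWith (fun a row => f (g a row) row) init m := by
  induction m generalizing init with
  | nil => simp
  | cons r rs ih =>
    cases init with
    | nil => simp
    | cons a as => simp only [List.zipWith_cons_cons, ih]

-- zipWith against a constant-zero left list is a map over the rows
theorem zipWith_map_zero (f : Int → List Int → Int) (m : List (List Int)) :
    List.zipWith f (m.map (fun _ => (0 : Int))) m = m.map (fun row => f 0 row) := by
  induction m with
  | nil => rfl
  | cons r rs ih => simp only [List.map_cons, List.zipWith_cons_cons, ih]

-- the column-major fold equals a zipWith of per-row partial sums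
theorem foldl_cols_eq (vector : List Int) (matrix : List (List Int)) (n : Nat) :
    (List.range n).foldl
      (fun acc i => List.zipWith (fun a row => a + (vector.getD i 0) * (row.getD i 0)) acc matrix)
      (matrix.map (fun _ => (0 : Int)))
    = List.zipWith
        (fun (a : Int) (row : List Int) =>
          a + (List.range n).foldl (fun s i => s + (row.getD i 0) * (vector.getD i 0)) 0)
        (matrix.map (fun _ => (0 : Int))) matrix := by
  induction n with
  | zero =>
    simp only [List.range_zero, List.foldl_nil]
    rw [zipWith_map_zero]
    simp
  | succ n ih =>
    rw [List.range_succ, List.foldl_append, ih, List.foldl_cons, List.foldl_nil,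
      zipWith_zipWith_same]
    congr 1
    funext a row
    rw [List.foldl_append, List.foldl_cons, List.foldl_nil]
    ring

-- ===== VERDICT (by name: the statement is the Claim_ definition above) =====
theorem matrix_vector_dot_spec : Claim_equal_matrix_vector_dot := by
  intro matrix vector p _ _
  show matrix_vector_dot matrix vector p = matrix_vector_dot_alt matrix vector p
  unfold matrix_vector_dot matrix_vector_dot_alt
  rw [foldl_cols_eq, zipWith_map_zero]
  simp [List.map_map]
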